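-- pv_equiv track=rewrite | github.com/wfeng1991/learnpy | py/leetcode/696.py | countBinarySubstrings1
-- ===== SOURCE A (Python) =====
-- def countBinarySubstrings1(s):
--     """
--     :type s: str
--     :rtype: int
--     """
--     i=0
--     cnt=0
--     while i<len(s):
--         j=i+1
--         while j<len(s):
--             f=True
--             p,q=i,j
--             while p<q:
--                 if s[p]==s[i] and s[q]==s[j] and s[p]!=s[q]:
--                     p+=1
--                     q-=1
--                 else:
--                     f=False
--                     break
--             if f:cnt+=1
--             j+=2
--         i+=1
--     return cnt
-- ===== SOURCE B (Python) =====
-- def countBinarySubstrings1(s):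
--     ans = 0
--     prev_run = 0
--     cur = 0
--     prev_ch = None
--     for ch in s:
--         if ch == prev_ch:
--             cur += 1
--         else:
--             ans += min(prev_run, cur)
--             prev_run, cur, prev_ch = cur, 1, ch
--     return ans + min(prev_run, cur)
-- ===== Notes on version B (the rewrite author's own statement) =====
-- stated objective: faster
-- what changed: replaced the O(n^3) all-pairs-with-inner-scan check by the classic one-pass run-length method: keep the previous and current run lengths and add min(prev,cur) at each run boundary
import Mathlib
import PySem

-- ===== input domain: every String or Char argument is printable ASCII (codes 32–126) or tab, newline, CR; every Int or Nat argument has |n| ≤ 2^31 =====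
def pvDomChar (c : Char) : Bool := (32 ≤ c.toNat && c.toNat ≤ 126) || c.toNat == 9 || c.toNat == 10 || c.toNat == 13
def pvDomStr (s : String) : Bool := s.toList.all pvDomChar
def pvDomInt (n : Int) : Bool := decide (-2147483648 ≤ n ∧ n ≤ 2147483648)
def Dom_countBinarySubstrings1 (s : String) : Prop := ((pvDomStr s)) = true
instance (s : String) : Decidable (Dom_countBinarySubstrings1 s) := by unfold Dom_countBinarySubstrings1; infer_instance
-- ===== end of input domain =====

-- B replaces A's O(n^3) scan of all even-length start/end pairs by the one-pass
-- run-length method (add min(previous run, current run) at each run boundary); faster (asymptotic).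

-- ===== PORT A =====
-- the innermost `while p<q` loop of A (returns the flag f)
def pyCheck (l : List Char) (c d : Char) (p q : Nat) : Bool :=
  if p < q then
    if l.getD p ' ' = c ∧ l.getD q ' ' = d ∧ l.getD p ' ' ≠ l.getD q ' ' then
      pyCheck l c d (p + 1) (q - 1)
    else false
  else true
termination_by q - p
decreasing_by omega

-- the middle `while j<len(s)` loop of A, carrying cnt
def loopJ (l : List Char) (i j : Nat) (cnt : Int) : Int :=
  if j < l.length then
    loopJ l i (j + 2) (if pyCheck l (l.getD i ' ') (l.getD j ' ') i j then cnt + 1 else cnt)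
  else cnt
termination_by l.length - j
decreasing_by omega

-- the outer `while i<len(s)` loop of A
def loopI (l : List Char) (i : Nat) (cnt : Int) : Int :=
  if i < l.length then loopI l (i + 1) (loopJ l i (i + 1) cnt) else cnt
termination_by l.length - i
decreasing_by omega

def countBinarySubstrings1 (s : String) : Int := loopI s.toList 0 0

-- ===== PORT B =====
-- one step of B's single pass: state (ans, prev_run, cur, prev_ch)
def altStep (st : Int × Int × Int × Option Char) (ch : Char) : Int × Int × Int × Option Char :=
  match st with
  | (ans, prevRun, cur, prevCh) =>
    if some ch = prevCh then (ans, prevRun, cur + 1, prevCh)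
    else (ans + min prevRun cur, cur, 1, some ch)

def countBinarySubstrings1_alt (s : String) : Int :=
  match s.toList.foldl altStep (0, 0, 0, none) with
  | (ans, prevRun, cur, _) => ans + min prevRun cur

-- ===== PRECONDITION & SPEC =====
def Spec_countBinarySubstrings1 (s : String) (out : Int) : Prop := out = countBinarySubstrings1_alt s
instance (s : String) (out : Int) : Decidable (Spec_countBinarySubstrings1 s out) := by unfold Spec_countBinarySubstrings1; infer_instance

-- ===== CLAIM (what is proved, stated in full; the proofs are below) =====
def Claim_equal_countBinarySubstrings1 : Prop := ∀ (s : String), Dom_countBinarySubstrings1 s → Spec_countBinarySubstrings1 s (countBinarySubstrings1 s)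

-- ===== LEMMAS AND PROOFS =====

-- length of the leading run of equal characters
def lead : List Char → Nat
  | [] => 0
  | [_] => 1
  | c :: d :: t => if d = c then lead (d :: t) + 1 else 1

theorem lead_pos (l : List Char) (h : l ≠ []) : 1 ≤ lead l := by
  match l with
  | [_] => simp [lead]
  | c :: d :: t => simp only [lead]; split <;> omega

theorem lead_le (l : List Char) : lead l ≤ l.length := by
  fun_induction lead <;> simp_all

theorem getD_lt_lead (l : List Char) (x : Nat) (hx : x < lead l) :
    l.getD x ' ' = l.getD 0 ' ' := by
  induction l using lead.induct generalizing x with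
  | case1 => simp [lead] at hx
  | case2 c => simp only [lead] at hx; interval_cases x <;> rfl
  | case3 d t ih =>
    simp only [lead, if_true] at hx
    match x with
    | 0 => rfl
    | x + 1 =>
      have := ih x (by omega)
      simpa [List.getD_cons_succ, List.getD_cons_zero] using this
  | case4 c d t hdc =>
    simp only [lead, if_neg hdc] at hx
    interval_cases x <;> rfl

theorem lead_getD_ne (l : List Char) (h : lead l < l.length) :
    l.getD (lead l) ' ' ≠ l.getD 0 ' ' := by
  induction l using lead.induct with
  | case1 => simp [lead] at h
  | case2 c => simp [lead] at h
  | case3 d t ih =>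
    simp only [lead, if_true] at h ⊢
    have h' : lead (d :: t) < (d :: t).length := by simpa using h
    have := ih h'
    simpa [List.getD_cons_succ, List.getD_cons_zero] using this
  | case4 c d t hdc =>
    simp only [lead, if_neg hdc]
    simpa [List.getD_cons_succ, List.getD_cons_zero] using hdc

theorem take_lead (l : List Char) : l.take (lead l) = List.replicate (lead l) (l.getD 0 ' ') := by
  induction l using lead.induct with
  | case1 => simp [lead]
  | case2 c => simp [lead]
  | case3 d t ih =>
    simp only [lead, if_true] at ih ⊢
    simp only [List.take_succ_cons, List.replicate_succ, List.getD_cons_zero]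
    rw [ih]
    simp [List.getD_cons_zero]
  | case4 c d t hdc => simp [lead, if_neg hdc]

-- run lengths of the string (proof-level spec)
def runsSpec (l : List Char) : List Nat :=
  if h : l = [] then [] else lead l :: runsSpec (l.drop (lead l))
termination_by l.length
decreasing_by
  have h1 := lead_pos l h
  have h2 : 0 < l.length := List.length_pos_of_ne_nil h
  simp only [List.length_drop]
  omega

-- sum of min over adjacent run lengths
def sm : List Nat → Int
  | a :: b :: t => (min a b : Nat) + sm (b :: t)
  | _ => 0

-- accumulator lemmas for A's tail-recursive loops
theorem loopJ_acc_aux (l : List Char) (i : Nat) :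
    ∀ fuel j cnt, l.length ≤ j + fuel → loopJ l i j cnt = cnt + loopJ l i j 0 := by
  intro fuel
  induction fuel with
  | zero =>
    intro j cnt h
    conv_lhs => rw [loopJ]
    conv_rhs => rw [loopJ]
    rw [if_neg (by omega : ¬ j < l.length), if_neg (by omega : ¬ j < l.length)]; ring
  | succ n ih =>
    intro j cnt h
    conv_lhs => rw [loopJ]
    conv_rhs => rw [loopJ]
    by_cases hj : j < l.length
    · rw [if_pos hj, if_pos hj]
      split_ifs with hc
      · rw [ih (j+2) (cnt+1) (by omega), ih (j+2) (0+1) (by omega)]; ring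
      · rw [ih (j+2) cnt (by omega)]
    · rw [if_neg hj, if_neg hj]; ring

theorem loopJ_acc (l : List Char) (i j : Nat) (cnt : Int) :
    loopJ l i j cnt = cnt + loopJ l i j 0 :=
  loopJ_acc_aux l i l.length j cnt (by omega)

theorem loopI_acc_aux (l : List Char) :
    ∀ fuel i cnt, l.length ≤ i + fuel → loopI l i cnt = cnt + loopI l i 0 := by
  intro fuel
  induction fuel with
  | zero =>
    intro i cnt h
    conv_lhs => rw [loopI]
    conv_rhs => rw [loopI]
    rw [if_neg (by omega : ¬ i < l.length), if_neg (by omega : ¬ i < l.length)]; ring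
  | succ n ih =>
    intro i cnt h
    conv_lhs => rw [loopI]
    conv_rhs => rw [loopI]
    by_cases hi : i < l.length
    · rw [if_pos hi, if_pos hi, ih (i+1) (loopJ l i (i+1) cnt) (by omega),
        ih (i+1) (loopJ l i (i+1) 0) (by omega), loopJ_acc l i (i+1) cnt]
      ring
    · rw [if_neg hi, if_neg hi]; ring

theorem loopI_acc (l : List Char) (i : Nat) (cnt : Int) :
    loopI l i cnt = cnt + loopI l i 0 :=
  loopI_acc_aux l l.length i cnt (by omega)

-- characterisation of the innermost loop: all symmetric position pairs must pass
theorem check_iff (l : List Char) (c d : Char) (p q : Nat) :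
    pyCheck l c d p q = true ↔
      ∀ k, p + k < q - k →
        (l.getD (p+k) ' ' = c ∧ l.getD (q-k) ' ' = d ∧ l.getD (p+k) ' ' ≠ l.getD (q-k) ' ') := by
  fun_induction pyCheck l c d p q with
  | case1 p q hlt hcond ih =>
    rw [ih]
    constructor
    · intro h k hk
      match k with
      | 0 => simpa using hcond
      | k + 1 =>
        have := h k (by omega)
        have e : q - 1 - k = q - (k + 1) := by omega
        have e2 : p + 1 + k = p + (k + 1) := by omega
        rw [e, e2] at this
        exact this
    · intro h k hk
      have := h (k + 1) (by omega)
      have e : q - (k + 1) = q - 1 - k := by omega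
      have e2 : p + (k + 1) = p + 1 + k := by omega
      rw [e, e2] at this
      exact this
  | case2 p q hlt hcond =>
    simp only [Bool.false_eq_true, false_iff]
    intro h
    exact hcond (h 0 (by omega))
  | case3 p q hlt =>
    simp only [true_iff]
    intro k hk
    omega

-- index shift between l and l.drop a
theorem getD_drop' (l : List Char) (a k : Nat) :
    (l.drop a).getD k ' ' = l.getD (a + k) ' ' := by
  simp [List.getD_eq_getElem?_getD, List.getElem?_drop]

theorem check_shift (l : List Char) (a : Nat) (c d : Char) (p q : Nat) :
    pyCheck (l.drop a) c d p q = pyCheck l c d (a + p) (a + q) := by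
  fun_induction pyCheck (l.drop a) c d p q with
  | case1 p q hlt hcond ih =>
    conv_rhs => rw [pyCheck]
    rw [getD_drop' l a p, getD_drop' l a q] at hcond
    rw [if_pos (by omega), if_pos hcond, ih,
      show a + (p + 1) = a + p + 1 from by omega,
      show a + (q - 1) = a + q - 1 from by omega]
  | case2 p q hlt hcond =>
    conv_rhs => rw [pyCheck]
    rw [getD_drop' l a p, getD_drop' l a q] at hcond
    rw [if_pos (by omega), if_neg hcond]
  | case3 p q hlt =>
    conv_rhs => rw [pyCheck]
    rw [if_neg (by omega)]

theorem loopJ_shift_aux (l : List Char) (a : Nat) :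
    ∀ fuel i j cnt, l.length ≤ a + j + fuel →
      loopJ (l.drop a) i j cnt = loopJ l (a + i) (a + j) cnt := by
  intro fuel
  induction fuel with
  | zero =>
    intro i j cnt h
    conv_lhs => rw [loopJ]
    conv_rhs => rw [loopJ]
    rw [if_neg (by simp only [List.length_drop]; omega), if_neg (by omega)]
  | succ n ih =>
    intro i j cnt h
    conv_lhs => rw [loopJ]
    conv_rhs => rw [loopJ]
    by_cases hj : a + j < l.length
    · rw [if_pos (by simp only [List.length_drop]; omega), if_pos hj,
        getD_drop' l a i, getD_drop' l a j, check_shift,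
        ih i (j + 2) _ (by omega),
        show a + (j + 2) = a + j + 2 from by omega]
    · rw [if_neg (by simp only [List.length_drop]; omega), if_neg hj]

theorem loopJ_shift (l : List Char) (a i j : Nat) (cnt : Int) :
    loopJ (l.drop a) i j cnt = loopJ l (a + i) (a + j) cnt :=
  loopJ_shift_aux l a l.length i j cnt (by omega)

theorem loopI_shift_aux (l : List Char) (a : Nat) :
    ∀ fuel i cnt, l.length ≤ a + i + fuel →
      loopI (l.drop a) i cnt = loopI l (a + i) cnt := by
  intro fuel
  induction fuel with
  | zero =>
    intro i cnt h
    conv_lhs => rw [loopI]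
    conv_rhs => rw [loopI]
    rw [if_neg (by simp only [List.length_drop]; omega), if_neg (by omega)]
  | succ n ih =>
    intro i cnt h
    conv_lhs => rw [loopI]
    conv_rhs => rw [loopI]
    by_cases hi : a + i < l.length
    · rw [if_pos (by simp only [List.length_drop]; omega), if_pos hi,
        loopJ_shift l a i (i + 1) cnt,
        ih (i + 1) _ (by omega),
        show a + (i + 1) = a + i + 1 from by omega]
    · rw [if_neg (by simp only [List.length_drop]; omega), if_neg hi]

theorem loopI_shift (l : List Char) (a i : Nat) (cnt : Int) :
    loopI (l.drop a) i cnt = loopI l (a + i) cnt :=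
  loopI_shift_aux l a l.length i cnt (by omega)

-- on a constant stretch the check fails immediately (s[p] == s[q])
theorem check_false_of_eq (l : List Char) (i j : Nat) (hij : i < j)
    (h : l.getD i ' ' = l.getD j ' ') :
    pyCheck l (l.getD i ' ') (l.getD j ' ') i j = false := by
  cases hc : pyCheck l (l.getD i ' ') (l.getD j ' ') i j with
  | false => rfl
  | true =>
    exfalso
    have := ((check_iff l _ _ i j).mp hc) 0 (by omega)
    simp only [Nat.add_zero, Nat.sub_zero] at this
    exact this.2.2 h

theorem loopJ_allc_aux (l : List Char)
    (hconst : ∀ x, x < l.length → l.getD x ' ' = l.getD 0 ' ') :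
    ∀ fuel i j, i < j → l.length ≤ j + fuel → loopJ l i j 0 = 0 := by
  intro fuel
  induction fuel with
  | zero =>
    intro i j _ h
    rw [loopJ, if_neg (by omega)]
  | succ n ih =>
    intro i j hij h
    conv_lhs => rw [loopJ]
    by_cases hj : j < l.length
    · rw [if_pos hj,
        check_false_of_eq l i j hij (by rw [hconst i (by omega), hconst j (by omega)])]
      simp only [Bool.false_eq_true, if_false]
      exact ih i (j + 2) (by omega) (by omega)
    · rw [if_neg hj]

theorem loopI_allc_aux (l : List Char)
    (hconst : ∀ x, x < l.length → l.getD x ' ' = l.getD 0 ' ') :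
    ∀ fuel i, l.length ≤ i + fuel → loopI l i 0 = 0 := by
  intro fuel
  induction fuel with
  | zero =>
    intro i h
    rw [loopI, if_neg (by omega)]
  | succ n ih =>
    intro i h
    conv_lhs => rw [loopI]
    by_cases hi : i < l.length
    · rw [if_pos hi, loopJ_allc_aux l hconst l.length i (i + 1) (by omega) (by omega),
        loopI_acc, ih (i + 1) (by omega)]
      ring
    · rw [if_neg hi]

-- the inner check succeeds exactly for the substring c^m d^m sitting at the run boundary
theorem good_iff (l : List Char) (a b : Nat)
    (ha : 1 ≤ a) (hb : 1 ≤ b) (hab : a + b ≤ l.length)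
    (hc : ∀ x, x < a → l.getD x ' ' = l.getD 0 ' ')
    (hd : ∀ x, a ≤ x → x < a + b → l.getD x ' ' = l.getD a ' ')
    (hcd : l.getD a ' ' ≠ l.getD 0 ' ')
    (he : a + b < l.length → l.getD (a + b) ' ' ≠ l.getD a ' ')
    (i j : Nat) (hia : i < a) (hij : i < j) (hjn : j < l.length)
    (hpar : (j + i) % 2 = 1) :
    (pyCheck l (l.getD i ' ') (l.getD j ' ') i j = true) ↔ (j + i + 1 = 2*a ∧ a - i ≤ b) := by
  obtain ⟨m, hm⟩ : ∃ m, j = i + 2*m + 1 := ⟨(j - i - 1)/2, by omega⟩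
  rw [check_iff]
  constructor
  · intro h
    have hic : l.getD i ' ' = l.getD 0 ' ' := hc i hia
    have hA : a ≤ i + m + 1 := by
      by_contra hlt
      push_neg at hlt
      have h1 := h m (by omega)
      have e : j - m = i + m + 1 := by omega
      rw [e] at h1
      exact h1.2.2 (by rw [hc (i+m) (by omega), hc (i+m+1) (by omega)])
    have hB : i + m + 1 ≤ a := by
      by_contra hgt
      push_neg at hgt
      have h1 := h (a - i) (by omega)
      have e : i + (a - i) = a := by omega
      rw [e] at h1
      rw [hic] at h1
      exact hcd h1.1
    refine ⟨by omega, ?_⟩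
    by_contra hbm
    push_neg at hbm
    have hk0 := h (m - b) (by omega)
    have hk1 := h (m - b + 1) (by omega)
    have e0 : j - (m - b) = a + b := by omega
    have e1 : j - (m - b + 1) = a + b - 1 := by omega
    rw [e0] at hk0
    rw [e1] at hk1
    have hd1 : l.getD (a + b - 1) ' ' = l.getD a ' ' := hd (a+b-1) (by omega) (by omega)
    have hab' : a + b < l.length := by omega
    have hne := he hab'
    rw [hd1] at hk1
    rw [hk1.2.1] at hne
    exact hne hk0.2.1
  · rintro ⟨hsum, hle⟩
    intro k hk
    have hkm : k ≤ m := by omega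
    have hjd : l.getD j ' ' = l.getD a ' ' := hd j (by omega) (by omega)
    refine ⟨?_, ?_, ?_⟩
    · rw [hc (i+k) (by omega), hc i (by omega)]
    · rw [hd (j-k) (by omega) (by omega), hjd]
    · rw [hc (i+k) (by omega), hd (j-k) (by omega) (by omega)]
      exact fun hh => hcd hh.symm

-- the middle loop finds at most the single matching end position
theorem loopJ_run (l : List Char) (a b : Nat)
    (ha : 1 ≤ a) (hb : 1 ≤ b) (hab : a + b ≤ l.length)
    (hc : ∀ x, x < a → l.getD x ' ' = l.getD 0 ' ')
    (hd : ∀ x, a ≤ x → x < a + b → l.getD x ' ' = l.getD a ' ')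
    (hcd : l.getD a ' ' ≠ l.getD 0 ' ')
    (he : a + b < l.length → l.getD (a + b) ' ' ≠ l.getD a ' ')
    (i : Nat) (hia : i < a) :
    ∀ fuel j, i < j → (j + i) % 2 = 1 → l.length ≤ j + fuel →
      loopJ l i j 0 = if j + i + 1 ≤ 2*a ∧ a - i ≤ b then 1 else 0 := by
  intro fuel
  induction fuel with
  | zero =>
    intro j hij hpar h
    rw [loopJ, if_neg (by omega)]
    split_ifs with hg
    · exfalso; obtain ⟨h1, h2⟩ := hg; omega
    · rfl
  | succ n ih =>
    intro j hij hpar h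
    conv_lhs => rw [loopJ]
    by_cases hj : j < l.length
    · rw [if_pos hj, loopJ_acc]
      by_cases hg : j + i + 1 = 2*a ∧ a - i ≤ b
      · have hcheck : pyCheck l (l.getD i ' ') (l.getD j ' ') i j = true :=
          (good_iff l a b ha hb hab hc hd hcd he i j hia hij hj hpar).mpr hg
        rw [if_pos hcheck, ih (j+2) (by omega) (by omega) (by omega),
          if_neg (by omega), if_pos (by omega)]
        norm_num
      · have hcheck : pyCheck l (l.getD i ' ') (l.getD j ' ') i j = false := by
          cases hc' : pyCheck l (l.getD i ' ') (l.getD j ' ') i j with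
          | false => rfl
          | true =>
            exact absurd ((good_iff l a b ha hb hab hc hd hcd he i j hia hij hj hpar).mp hc') hg
        rw [if_neg (by rw [hcheck]; simp), ih (j+2) (by omega) (by omega) (by omega)]
        by_cases hcnd : j + i + 1 ≤ 2*a ∧ a - i ≤ b
        · obtain ⟨hc1, hc2⟩ := hcnd
          rw [if_pos (by constructor <;> omega), if_pos (by constructor <;> omega)]
          norm_num
        · rw [if_neg (by intro hx; exact hcnd ⟨by omega, hx.2⟩), if_neg hcnd]
          norm_num
    · rw [if_neg hj]
      split_ifs with hg
      · exfalso; obtain ⟨h1, h2⟩ := hg; omega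
      · rfl

-- summing the outer loop over the first run
theorem loopI_head (l : List Char) (a b : Nat)
    (ha : 1 ≤ a) (hb : 1 ≤ b) (hab : a + b ≤ l.length)
    (hc : ∀ x, x < a → l.getD x ' ' = l.getD 0 ' ')
    (hd : ∀ x, a ≤ x → x < a + b → l.getD x ' ' = l.getD a ' ')
    (hcd : l.getD a ' ' ≠ l.getD 0 ' ')
    (he : a + b < l.length → l.getD (a + b) ' ' ≠ l.getD a ' ') :
    ∀ fuel i, i ≤ a → a ≤ i + fuel →
      loopI l i 0 = ((min (a - i) b : Nat) : Int) + loopI l a 0 := by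
  intro fuel
  induction fuel with
  | zero =>
    intro i hi1 hi2
    have : i = a := by omega
    subst this
    simp
  | succ n ih =>
    intro i hi1 hi2
    by_cases hieq : i = a
    · subst hieq; simp
    · have hia : i < a := by omega
      conv_lhs => rw [loopI]
      rw [if_pos (by omega), loopI_acc,
        loopJ_run l a b ha hb hab hc hd hcd he i hia l.length (i+1) (by omega) (by omega) (by omega),
        ih (i+1) (by omega) (by omega)]
      have hcnd : ((i+1) + i + 1 ≤ 2*a ∧ a - i ≤ b) ↔ (a - i ≤ b) := by
        constructor
        · exact fun hx => hx.2
        · exact fun hx => ⟨by omega, hx⟩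
      generalize loopI l a 0 = X
      split_ifs with h1
      · push_cast; omega
      · have : ¬ (a - i ≤ b) := fun hx => h1 ⟨by omega, hx⟩
        push_cast; omega

theorem A_eq : ∀ (l : List Char), loopI l 0 0 = sm (runsSpec l) := by
  have H : ∀ n (l : List Char), l.length ≤ n → loopI l 0 0 = sm (runsSpec l) := by
    intro n
    induction n with
    | zero =>
      intro l hl
      have : l = [] := List.eq_nil_of_length_eq_zero (by omega)
      subst this
      rw [loopI, if_neg (by simp), runsSpec]
      simp [sm]
    | succ n ih =>
      intro l hl
      by_cases hnil : l = []
      · subst hnil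
        rw [loopI, if_neg (by simp), runsSpec]
        simp [sm]
      · have ha : 1 ≤ lead l := lead_pos l hnil
        have hale : lead l ≤ l.length := lead_le l
        have hc : ∀ x, x < lead l → l.getD x ' ' = l.getD 0 ' ' := fun x hx => getD_lt_lead l x hx
        rw [runsSpec, dif_neg hnil]
        by_cases hra : l.length ≤ lead l
        · have hconst : ∀ x, x < l.length → l.getD x ' ' = l.getD 0 ' ' := fun x hx => hc x (by omega)
          rw [loopI_allc_aux l hconst l.length 0 (by omega)]
          have hdrop : l.drop (lead l) = [] := List.drop_eq_nil_of_le hra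
          rw [hdrop, runsSpec]
          simp [sm]
        · push_neg at hra
          have hrlen : (l.drop (lead l)).length = l.length - lead l := by simp
          have hrne : l.drop (lead l) ≠ [] := by
            intro hx
            rw [hx] at hrlen
            simp at hrlen
            omega
          have hb : 1 ≤ lead (l.drop (lead l)) := lead_pos _ hrne
          have hble : lead (l.drop (lead l)) ≤ (l.drop (lead l)).length := lead_le _
          have hab : lead l + lead (l.drop (lead l)) ≤ l.length := by omega
          have hdx : ∀ x, lead l ≤ x → x < lead l + lead (l.drop (lead l)) →
              l.getD x ' ' = l.getD (lead l) ' ' := by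
            intro x hx1 hx2
            have h1 := getD_lt_lead (l.drop (lead l)) (x - lead l) (by omega)
            rw [getD_drop', getD_drop'] at h1
            rw [show lead l + (x - lead l) = x from by omega, Nat.add_zero] at h1
            exact h1
          have hcd : l.getD (lead l) ' ' ≠ l.getD 0 ' ' := lead_getD_ne l (by omega)
          have hee : lead l + lead (l.drop (lead l)) < l.length →
              l.getD (lead l + lead (l.drop (lead l))) ' ' ≠ l.getD (lead l) ' ' := by
            intro habl
            have h2 := lead_getD_ne (l.drop (lead l)) (by omega)
            rw [getD_drop', getD_drop', Nat.add_zero] at h2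
            exact h2
          have step1 := loopI_head l (lead l) (lead (l.drop (lead l)))
            ha hb hab hc hdx hcd hee (lead l) 0 (by omega) (by omega)
          have step2 : loopI l (lead l) 0 = loopI (l.drop (lead l)) 0 0 := by
            rw [loopI_shift l (lead l) 0 0, Nat.add_zero]
          have step3 : loopI (l.drop (lead l)) 0 0 = sm (runsSpec (l.drop (lead l))) :=
            ih _ (by omega)
          rw [step1, step2, step3, Nat.sub_zero]
          rw [show runsSpec (l.drop (lead l)) =
              lead (l.drop (lead l)) :: runsSpec ((l.drop (lead l)).drop (lead (l.drop (lead l)))) from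
            by rw [runsSpec, dif_neg hrne]]
          rw [show ∀ x y t, sm (x :: y :: t) = ((min x y : Nat) : Int) + sm (y :: t) from
            fun x y t => rfl]
  intro l
  exact H l.length l (by omega)




-- ===== B-side lemmas =====
def bFin (st : Int × Int × Int × Option Char) : Int :=
  match st with | (ans, pr, cur, _) => ans + min pr cur

theorem B_absorb : ∀ (k : Nat) (c : Char) (ans pr cur : Int),
    (List.replicate k c).foldl altStep (ans, pr, cur, some c) = (ans, pr, cur + k, some c) := by
  intro k
  induction k with
  | zero => intro c ans pr cur; simp
  | succ n ih =>
    intro c ans pr cur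
    rw [List.replicate_succ, List.foldl_cons,
      show altStep (ans, pr, cur, some c) c = (ans, pr, cur + 1, some c) from by simp [altStep],
      ih, show cur + 1 + (n : Int) = cur + ((n + 1 : Nat) : Int) from by push_cast; ring]

theorem B_key : ∀ (n : Nat) (l : List Char), l.length ≤ n →
    ∀ (c : Char) (ans pr : Int) (cur : Nat),
    (l = [] ∨ l.getD 0 ' ' ≠ c) →
    bFin (l.foldl altStep (ans, pr, (cur : Int), some c)) =
      ans + min pr (cur : Int) + sm (cur :: runsSpec l) := by
  intro n
  induction n with
  | zero =>
    intro l hl c ans pr cur _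
    have : l = [] := List.eq_nil_of_length_eq_zero (by omega)
    subst this
    rw [runsSpec]
    simp [bFin, sm]
  | succ n ih =>
    intro l hl c ans pr cur hne
    by_cases hnil : l = []
    · subst hnil; rw [runsSpec]; simp [bFin, sm]
    · have hd0 : l.getD 0 ' ' ≠ c := hne.resolve_left hnil
      have hb := lead_pos l hnil
      have hble := lead_le l
      have hsplit : l = List.replicate (lead l) (l.getD 0 ' ') ++ l.drop (lead l) := by
        conv_lhs => rw [← List.take_append_drop (lead l) l]
        rw [take_lead]
      conv_lhs => rw [hsplit]
      rw [List.foldl_append,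
        show List.replicate (lead l) (l.getD 0 ' ') =
            (l.getD 0 ' ') :: List.replicate (lead l - 1) (l.getD 0 ' ') from by
          rw [← List.replicate_succ]; congr 1; omega,
        List.foldl_cons,
        show altStep (ans, pr, (cur : Int), some c) (l.getD 0 ' ') =
            (ans + min pr (cur : Int), (cur : Int), 1, some (l.getD 0 ' ')) from by
          rw [altStep, if_neg (fun h => hd0 (Option.some.inj h))],
        B_absorb,
        show (1 : Int) + ((lead l - 1 : Nat) : Int) = ((lead l : Nat) : Int) from by
          push_cast; omega]
      have hrcond : l.drop (lead l) = [] ∨ (l.drop (lead l)).getD 0 ' ' ≠ l.getD 0 ' ' := by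
        by_cases hrn : l.drop (lead l) = []
        · left; exact hrn
        · right
          have hlt : lead l < l.length := by
            have h1 : (l.drop (lead l)).length = l.length - lead l := by simp
            have h2 := List.length_pos_of_ne_nil hrn
            omega
          have h2 := lead_getD_ne l hlt
          rw [getD_drop', Nat.add_zero]
          exact h2
      have hrlen : (l.drop (lead l)).length ≤ n := by
        simp only [List.length_drop]; omega
      rw [ih (l.drop (lead l)) hrlen (l.getD 0 ' ') (ans + min pr (cur : Int)) (cur : Int)
        (lead l) hrcond,
        show runsSpec l = lead l :: runsSpec (l.drop (lead l)) from by rw [runsSpec, dif_neg hnil],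
        show ∀ x y t, sm (x :: y :: t) = ((min x y : Nat) : Int) + sm (y :: t) from
          fun x y t => rfl]
      push_cast
      ring

theorem B_eq : ∀ (l : List Char),
    bFin (l.foldl altStep (0, 0, 0, none)) = sm (runsSpec l) := by
  intro l
  by_cases hnil : l = []
  · subst hnil; rw [runsSpec]; simp [bFin, sm]
  · have ha := lead_pos l hnil
    have hble := lead_le l
    have hsplit : l = List.replicate (lead l) (l.getD 0 ' ') ++ l.drop (lead l) := by
      conv_lhs => rw [← List.take_append_drop (lead l) l]
      rw [take_lead]
    conv_lhs => rw [hsplit]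
    rw [List.foldl_append,
      show List.replicate (lead l) (l.getD 0 ' ') =
          (l.getD 0 ' ') :: List.replicate (lead l - 1) (l.getD 0 ' ') from by
        rw [← List.replicate_succ]; congr 1; omega,
      List.foldl_cons,
      show altStep ((0 : Int), (0 : Int), (0 : Int), (none : Option Char)) (l.getD 0 ' ') =
          (0, 0, 1, some (l.getD 0 ' ')) from by simp [altStep],
      B_absorb,
      show (1 : Int) + ((lead l - 1 : Nat) : Int) = ((lead l : Nat) : Int) from by omega]
    have hrcond : l.drop (lead l) = [] ∨ (l.drop (lead l)).getD 0 ' ' ≠ l.getD 0 ' ' := by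
      by_cases hrn : l.drop (lead l) = []
      · left; exact hrn
      · right
        have hlt : lead l < l.length := by
          have h1 : (l.drop (lead l)).length = l.length - lead l := by simp
          have h2 := List.length_pos_of_ne_nil hrn
          omega
        have h2 := lead_getD_ne l hlt
        rw [getD_drop', Nat.add_zero]
        exact h2
    rw [B_key (l.drop (lead l)).length (l.drop (lead l)) (le_refl _) (l.getD 0 ' ') 0 0
        (lead l) hrcond,
      show runsSpec l = lead l :: runsSpec (l.drop (lead l)) from by rw [runsSpec, dif_neg hnil]]
    rw [min_eq_left (Int.natCast_nonneg _)]
    ring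

-- ===== VERDICT (by name: the statement is the Claim_ definition above) =====
theorem countBinarySubstrings1_spec : Claim_equal_countBinarySubstrings1 := by
  unfold Claim_equal_countBinarySubstrings1
  intro s _
  unfold Spec_countBinarySubstrings1
  show countBinarySubstrings1 s = countBinarySubstrings1_alt s
  rw [show countBinarySubstrings1 s = loopI s.toList 0 0 from rfl,
    show countBinarySubstrings1_alt s = bFin (s.toList.foldl altStep (0, 0, 0, none)) from rfl,
    A_eq, B_eq]
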